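-- pv_equiv track=rewrite | github.com/Salbegod/Redes2022 | t1.py | HDB3Encoder
-- ===== SOURCE A (Python) =====
-- def invert(signal):
--     if signal == "+":
--         return "-"
--     if signal == "-":
--         return "+"
--     if signal == "0":
--         return "0"
--
-- def HDB3Encoder(hexValue):
--     binary = bin(int('1'+hexValue,16))[3:]
--     result = ""
--     signal = "-"
--     numberOnes = 0
--     numberZeroes = 0
--     for bit in binary:
--         if bit == '1':
--             if numberZeroes > 0 and numberZeroes < 4:
--                 result += (numberZeroes*"0")
--                 numberZeroes = 0
--             numberOnes += 1
--             result += invert(signal)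
--             signal = invert(signal)
--         else:
--             numberZeroes += 1
--             if numberZeroes == 4:
--                 numberZeroes = 0
--                 if numberOnes%2 == 0:
--                     result += (invert(signal) + "00" + invert(signal))
--                 else:
--                     result += ("000" + signal)
--     if numberZeroes != 0:
--         result += (numberZeroes*"0")
--     return result
-- ===== SOURCE B (Python) =====
-- def HDB3Encoder(hexValue):
--     bits = bin(int('1' + hexValue, 16))[3:]
--     # run-shaped pass: split into maximal zero-runs separated by single '1's
--     runs = bits.split('1')
--     out = []
--     sig = "-"
--     ones = 0
--     pending = 0
--     first = True
--     for run in runs: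
--         if not first:
--             # a '1' precedes this run: flush pending zeros, emit alternating mark
--             out.append("0" * pending)
--             sig = "-" if sig == "+" else "+"
--             ones += 1
--             out.append(sig)
--         first = False
--         group = ("-00-" if sig == "+" else "+00+") if ones % 2 == 0 else "000" + sig
--         out.append(group * (len(run) // 4))
--         pending = len(run) % 4
--     out.append("0" * pending)
--     return "".join(out)
-- ===== Notes on version B (the rewrite author's own statement) =====
-- stated objective: alternative
-- what changed: B replaces A's bit-by-bit state machine (per-bit zero counter and flush logic) by a run-shaped pass: it splits the binary string on '1' into maximal zero-runs and emits, per run, length//4 whole substitution groups plus a pending remainder flushed at the next mark or at the end.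
import Mathlib
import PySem

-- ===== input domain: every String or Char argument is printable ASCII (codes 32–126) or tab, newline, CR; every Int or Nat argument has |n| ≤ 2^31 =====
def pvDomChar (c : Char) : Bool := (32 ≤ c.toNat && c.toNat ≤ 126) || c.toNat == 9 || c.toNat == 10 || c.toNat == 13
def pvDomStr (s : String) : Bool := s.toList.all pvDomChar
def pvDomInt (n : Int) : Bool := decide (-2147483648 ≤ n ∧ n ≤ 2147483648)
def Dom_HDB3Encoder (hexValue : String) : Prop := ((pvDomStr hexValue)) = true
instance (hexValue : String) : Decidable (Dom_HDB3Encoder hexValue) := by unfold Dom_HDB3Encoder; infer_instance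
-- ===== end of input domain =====

-- B re-encodes by maximal zero-runs (split on '1') instead of A's per-bit state machine; same output, same cost (objective: alternative).

-- ===== PORT A =====

-- shared by both ports: `bin(int('1' + hexValue, 16))[3:]` (hand-ported, exact on Pre_:
-- int() strips trailing whitespace and ignores underscores, and the '1' prefix preserves
-- leading zeros, so the bits are exactly the concatenated 4-bit nibbles of the hex digits).
def isWS (c : Char) : Bool := c = ' ' || c = '\t' || c = '\n' || c = '\r'

def hexVal (c : Char) : Nat :=
  if c.isDigit then c.toNat - 48
  else if 'a' ≤ c ∧ c ≤ 'f' then c.toNat - 87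
  else c.toNat - 55

def nibble (c : Char) : List Char :=
  [if hexVal c / 8 % 2 = 1 then '1' else '0',
   if hexVal c / 4 % 2 = 1 then '1' else '0',
   if hexVal c / 2 % 2 = 1 then '1' else '0',
   if hexVal c % 2 = 1 then '1' else '0']

def toBits (hexValue : String) : List Char :=
  (((hexValue.toList.reverse.dropWhile isWS).reverse).filter (fun c => c ≠ '_')).flatMap nibble

-- Python's `invert`; on inputs other than '+','-','0' Python returns None (never reached here).
def invertA (signal : Char) : Char :=
  if signal = '+' then '-' else if signal = '-' then '+' else if signal = '0' then '0' else signal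

-- the loop body of A, state = (result, signal, numberOnes, numberZeroes)
def stepA (st : List Char × Char × Nat × Nat) (bit : Char) : List Char × Char × Nat × Nat :=
  match st with
  | (result, signal, numberOnes, numberZeroes) =>
    if bit = '1' then
      let result := if 0 < numberZeroes ∧ numberZeroes < 4 then result ++ List.replicate numberZeroes '0' else result
      let numberZeroes := if 0 < numberZeroes ∧ numberZeroes < 4 then 0 else numberZeroes
      (result ++ [invertA signal], invertA signal, numberOnes + 1, numberZeroes)
    else
      let numberZeroes := numberZeroes + 1
      if numberZeroes = 4 then
        if numberOnes % 2 = 0 then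
          (result ++ [invertA signal, '0', '0', invertA signal], signal, numberOnes, 0)
        else
          (result ++ ['0', '0', '0', signal], signal, numberOnes, 0)
      else (result, signal, numberOnes, numberZeroes)

def HDB3Encoder (hexValue : String) : String :=
  match (toBits hexValue).foldl stepA ([], '-', 0, 0) with
  | (result, _, _, numberZeroes) =>
      String.mk (if numberZeroes ≠ 0 then result ++ List.replicate numberZeroes '0' else result)

-- ===== PORT B =====

-- bits.split('1') (port of str.split on a 1-char separator)
def splitOn1 : List Char → List (List Char)
  | [] => [[]]
  | c :: rest =>
    match splitOn1 rest with
    | [] => [[]]  -- unreachable: splitOn1 never returns []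
    | r :: rs => if c = '1' then [] :: r :: rs else (c :: r) :: rs

def flipB (signal : Char) : Char := if signal = '+' then '-' else '+'

def groupB (signal : Char) (ones : Nat) : List Char :=
  if ones % 2 = 0 then (if signal = '+' then ['-', '0', '0', '-'] else ['+', '0', '0', '+'])
  else ['0', '0', '0', signal]

-- group * n
def repeatG (g : List Char) (n : Nat) : List Char := (List.replicate n g).flatten

-- the runs after the first: each is preceded by one '1'
def goB : List (List Char) → Char → Nat → Nat → List Char
  | [], _, _, pending => List.replicate pending '0'
  | r :: rs, signal, ones, pending =>
    List.replicate pending '0' ++ [flipB signal] ++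
      repeatG (groupB (flipB signal) (ones + 1)) (r.length / 4) ++
      goB rs (flipB signal) (ones + 1) (r.length % 4)

def HDB3Encoder_alt (hexValue : String) : String :=
  match splitOn1 (toBits hexValue) with
  | [] => ""  -- unreachable: splitOn1 never returns []
  | r :: rest =>
      String.mk (repeatG (groupB '-' 0) (r.length / 4) ++ goB rest '-' 0 (r.length % 4))

-- ===== PRECONDITION & SPEC =====
-- Pre_: exactly the inputs where Python's int('1'+hexValue, 16) succeeds — hex digits with
-- single non-trailing underscores, followed by optional trailing whitespace; elsewhere A
-- raises ValueError.
def isHexDig (c : Char) : Bool := c.isDigit || ('a' ≤ c && c ≤ 'f') || ('A' ≤ c && c ≤ 'F')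

def Pre_HDB3Encoder (hexValue : String) : Prop :=
  let core := (hexValue.toList.reverse.dropWhile isWS).reverse
  (core.all (fun c => isHexDig c || c = '_') = true) ∧
  ((core.zip core.tail).all (fun p => !(p.1 = '_' && p.2 = '_')) = true) ∧
  core.getLast? ≠ some '_'

instance (hexValue : String) : Decidable (Pre_HDB3Encoder hexValue) := by
  unfold Pre_HDB3Encoder; infer_instance

def pvWitness_HDB3Encoder : String := "1f"

def Spec_HDB3Encoder (hexValue : String) (out : String) : Prop := out = HDB3Encoder_alt hexValue
instance (hexValue : String) (out : String) : Decidable (Spec_HDB3Encoder hexValue out) := by unfold Spec_HDB3Encoder; infer_instance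

-- ===== CLAIM (what is proved, stated in full; the proofs are below) =====
def Claim_equal_HDB3Encoder : Prop := ∀ (hexValue : String), Dom_HDB3Encoder hexValue → Pre_HDB3Encoder hexValue → Spec_HDB3Encoder hexValue (HDB3Encoder hexValue)

-- ===== LEMMAS AND PROOFS =====

theorem toBits_mem (hexValue : String) : ∀ c ∈ toBits hexValue, c = '0' ∨ c = '1' := by
  intro c hc
  simp only [toBits, List.mem_flatMap] at hc
  obtain ⟨d, _, hd⟩ := hc
  simp only [nibble, List.mem_cons, List.not_mem_nil, or_false] at hd
  rcases hd with h | h | h | h <;> (subst h; split <;> simp)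

def glueR : List (List Char) → List Char
  | [] => []
  | r :: rs => r ++ rs.flatMap (fun r => '1' :: r)

theorem splitOn1_ne_nil (l : List Char) : splitOn1 l ≠ [] := by
  cases l with
  | nil => simp [splitOn1]
  | cons c rest =>
    cases h : splitOn1 rest with
    | nil => simp [splitOn1, h]
    | cons r rs => simp only [splitOn1, h]; split <;> simp

theorem glue_splitOn1 (l : List Char) : glueR (splitOn1 l) = l := by
  induction l with
  | nil => rfl
  | cons c rest ih =>
    cases h : splitOn1 rest with
    | nil => exact absurd h (splitOn1_ne_nil rest)
    | cons r rs =>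
      rw [h] at ih
      simp only [glueR] at ih
      by_cases hc : c = '1' <;> simp [splitOn1, h, hc, glueR, ih]

theorem mem_splitOn1 (l : List Char) : ∀ r ∈ splitOn1 l, ∀ c ∈ r, c ∈ l ∧ c ≠ '1' := by
  induction l with
  | nil => intro r hr c hc; simp [splitOn1] at hr; subst hr; simp at hc
  | cons a rest ih =>
    intro r hr c hc
    cases h : splitOn1 rest with
    | nil => exact absurd h (splitOn1_ne_nil rest)
    | cons r0 rs =>
      rw [h] at ih
      by_cases ha : a = '1'
      · simp [splitOn1, h, ha, List.mem_cons] at hr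
        rcases hr with hr | hr | hr
        · subst hr; simp at hc
        · have := ih r (by simp [hr]) c hc
          exact ⟨List.mem_cons_of_mem _ this.1, this.2⟩
        · have := ih r (List.mem_cons_of_mem _ hr) c hc
          exact ⟨List.mem_cons_of_mem _ this.1, this.2⟩
      · simp [splitOn1, h, ha, List.mem_cons] at hr
        rcases hr with hr | hr
        · subst hr
          rcases List.mem_cons.mp hc with hc | hc
          · subst hc; exact ⟨by simp, ha⟩
          · have := ih r0 (by simp) c hc
            exact ⟨List.mem_cons_of_mem _ this.1, this.2⟩
        · have := ih r (List.mem_cons_of_mem _ hr) c hc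
          exact ⟨List.mem_cons_of_mem _ this.1, this.2⟩

theorem repeatG_succ (g : List Char) (n : Nat) : repeatG g (n + 1) = repeatG g n ++ g := by
  simp [repeatG, List.replicate_succ']

theorem invertA_flip (sig : Char) (h : sig = '+' ∨ sig = '-') : invertA sig = flipB sig := by
  rcases h with h | h <;> subst h <;> decide

theorem flipB_pm (sig : Char) (h : sig = '+' ∨ sig = '-') : flipB sig = '+' ∨ flipB sig = '-' := by
  rcases h with h | h <;> subst h <;> decide

theorem groupB_eq (sig : Char) (ones : Nat) (h : sig = '+' ∨ sig = '-') :
    groupB sig ones =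
      (if ones % 2 = 0 then [invertA sig, '0', '0', invertA sig] else ['0', '0', '0', sig]) := by
  rcases h with h | h <;> subst h <;> simp [groupB, invertA]

-- A's fold over a run of L zeros, starting with zero counter 0
theorem foldl_zeros (L : Nat) (res : List Char) (sig : Char) (ones : Nat)
    (h : sig = '+' ∨ sig = '-') :
    (List.replicate L '0').foldl stepA (res, sig, ones, 0) =
      (res ++ repeatG (groupB sig ones) (L / 4), sig, ones, L % 4) := by
  induction L with
  | zero => simp [repeatG]
  | succ L ih =>
    rw [List.replicate_succ', List.foldl_append, ih]
    simp only [List.foldl_cons, List.foldl_nil]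
    have hne : ('0' : Char) ≠ '1' := by decide
    simp only [stepA, if_neg hne]
    by_cases h3 : L % 4 = 3
    · have h4 : L % 4 + 1 = 4 := by omega
      rw [if_pos h4, groupB_eq sig ones h]
      have hdiv : (L + 1) / 4 = L / 4 + 1 := by omega
      have hmod : (L + 1) % 4 = 0 := by omega
      rw [hdiv, hmod, repeatG_succ]
      by_cases he : ones % 2 = 0
      · rw [if_pos he, if_pos he]; simp [List.append_assoc]
      · rw [if_neg he, if_neg he]; simp [List.append_assoc]
    · have h4 : L % 4 + 1 ≠ 4 := by omega
      rw [if_neg h4]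
      have h5 : (L + 1) % 4 = L % 4 + 1 := by omega
      have h6 : (L + 1) / 4 = L / 4 := by omega
      rw [h5, h6]

theorem step_one (res : List Char) (sig : Char) (ones z : Nat) (hz : z < 4) :
    stepA (res, sig, ones, z) '1' =
      (res ++ List.replicate z '0' ++ [invertA sig], invertA sig, ones + 1, 0) := by
  interval_cases z <;> simp [stepA]

-- processing the runs after the first one (each preceded by a single '1')
theorem foldl_rest (rs : List (List Char)) : ∀ (res : List Char) (sig : Char) (ones z : Nat),
    z < 4 → (∀ r ∈ rs, ∀ c ∈ r, c = '0') → (sig = '+' ∨ sig = '-') →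
    (let st := (rs.flatMap (fun r => '1' :: r)).foldl stepA (res, sig, ones, z)
     st.1 ++ List.replicate st.2.2.2 '0') = res ++ goB rs sig ones z := by
  induction rs with
  | nil => intro res sig ones z hz hruns hsig; simp [goB]
  | cons r rs ih =>
    intro res sig ones z hz hruns hsig
    have hr0 : r = List.replicate r.length '0' := by
      have := hruns r (by simp)
      exact List.eq_replicate_length.mpr this
    simp only [List.flatMap_cons, List.cons_append, List.foldl_cons]
    rw [step_one res sig ones z hz, List.foldl_append]
    conv_lhs => rw [hr0]
    rw [foldl_zeros r.length (res ++ List.replicate z '0' ++ [invertA sig]) (invertA sig) (ones + 1)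
      (by rw [invertA_flip sig hsig]; exact flipB_pm sig hsig)]
    have := ih (res ++ List.replicate z '0' ++ [invertA sig] ++
        repeatG (groupB (invertA sig) (ones + 1)) (r.length / 4))
      (invertA sig) (ones + 1) (r.length % 4)
      (Nat.mod_lt _ (by norm_num)) (fun r hr => hruns r (List.mem_cons_of_mem _ hr))
      (by rw [invertA_flip sig hsig]; exact flipB_pm sig hsig)
    simp only at this ⊢
    rw [this]
    simp only [goB, invertA_flip sig hsig]
    simp [List.append_assoc]

theorem HDB3_eq (hexValue : String) : HDB3Encoder hexValue = HDB3Encoder_alt hexValue := by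
  unfold HDB3Encoder HDB3Encoder_alt
  cases hsplit : splitOn1 (toBits hexValue) with
  | nil => exact absurd hsplit (splitOn1_ne_nil _)
  | cons r rest =>
    have hbits : toBits hexValue = r ++ rest.flatMap (fun r => '1' :: r) := by
      have h := glue_splitOn1 (toBits hexValue)
      rw [hsplit] at h
      simpa [glueR] using h.symm
    have hz : ∀ r' ∈ splitOn1 (toBits hexValue), ∀ c ∈ r', c = '0' := by
      intro r' hr' c hc
      have h1 := mem_splitOn1 (toBits hexValue) r' hr' c hc
      rcases toBits_mem hexValue c h1.1 with h | h
      · exact h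
      · exact absurd h h1.2
    have hr0 : r = List.replicate r.length '0' :=
      List.eq_replicate_length.mpr (hz r (by rw [hsplit]; simp))
    rw [hbits, List.foldl_append]
    conv_lhs => rw [hr0]
    rw [foldl_zeros r.length [] '-' 0 (Or.inr rfl)]
    have hrest := foldl_rest rest (([] : List Char) ++ repeatG (groupB '-' 0) (r.length / 4))
      '-' 0 (r.length % 4) (Nat.mod_lt _ (by norm_num))
      (fun r' hr' => hz r' (by rw [hsplit]; exact List.mem_cons_of_mem _ hr')) (Or.inr rfl)
    simp only at hrest
    cases hst : (rest.flatMap (fun r => '1' :: r)).foldl stepA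
        (([] : List Char) ++ repeatG (groupB '-' 0) (r.length / 4), '-', 0, r.length % 4) with
    | mk result s2 =>
      obtain ⟨sg, ones, nz⟩ := s2
      rw [hst] at hrest
      simp only [List.nil_append] at hrest ⊢
      have hfin : (if nz ≠ 0 then result ++ List.replicate nz '0' else result) =
          result ++ List.replicate nz '0' := by
        by_cases h : nz = 0 <;> simp [h]
      rw [hfin, hrest]

-- ===== VERDICT (by name: the statement is the Claim_ definition above) =====
theorem HDB3Encoder_spec : Claim_equal_HDB3Encoder := by
  intro hexValue _ _
  unfold Spec_HDB3Encoder
  exact HDB3_eq hexValue
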